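-- pv_equiv track=rewrite | github.com/RajputGarima/Chord | node.py | in1
-- ===== SOURCE A (Python) =====
-- def in1(id, start, end):
--     if((id == start) or (id == end) or (start == end)):
--         return True
--     if(start > end):
--         return not in1(id, end, start)
--
--     if(id > start and id < end):
--         return True
--     return False
-- ===== SOURCE B (Python) =====
-- def in1(id, start, end):
--     # Branch-free XOR formulation of circular interval membership:
--     # boundaries/degenerate interval are True; otherwise id lies strictly
--     # inside (start, end) on the circle iff exactly an even/odd pattern of
--     # the three comparisons holds: ((start<id) XOR (id<end)) XOR (start<end).
--     return (id == start or id == end or start == end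
--             or ((start < id) != (id < end)) != (start < end))
-- ===== Notes on version B (the rewrite author's own statement) =====
-- stated objective: simpler
-- what changed: Replaces A's branching and recursive wrap-around call with a single branch-free XOR-of-comparisons formula: boundary guard or ((start<id) != (id<end)) != (start<end).
import Mathlib
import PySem

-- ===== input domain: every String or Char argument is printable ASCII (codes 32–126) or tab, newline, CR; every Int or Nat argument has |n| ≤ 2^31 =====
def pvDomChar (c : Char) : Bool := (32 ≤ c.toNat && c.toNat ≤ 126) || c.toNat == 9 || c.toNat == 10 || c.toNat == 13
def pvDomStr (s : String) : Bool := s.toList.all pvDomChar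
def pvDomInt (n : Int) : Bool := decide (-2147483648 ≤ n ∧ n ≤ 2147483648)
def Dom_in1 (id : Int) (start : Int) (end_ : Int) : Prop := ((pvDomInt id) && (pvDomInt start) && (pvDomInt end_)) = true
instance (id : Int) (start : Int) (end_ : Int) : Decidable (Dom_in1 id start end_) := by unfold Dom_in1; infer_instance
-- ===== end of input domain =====

-- B replaces A's branches and recursive wrap-around call by a single branch-free XOR-of-comparisons formula (simpler).

-- ===== PORT A =====
def in1 (id : Int) (start : Int) (end_ : Int) : Bool :=
  if id == start || id == end_ || start == end_ then
    true
  else if start > end_ then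
    !(in1 id end_ start)
  else if id > start && id < end_ then
    true
  else
    false
termination_by (if start > end_ then 1 else 0)
decreasing_by simp_all; omega

-- ===== PORT B =====
def in1_alt (id : Int) (start : Int) (end_ : Int) : Bool :=
  id == start || id == end_ || start == end_ ||
    ((decide (start < id) != decide (id < end_)) != decide (start < end_))

-- ===== PRECONDITION & SPEC =====
def Spec_in1 (id : Int) (start : Int) (end_ : Int) (out : Bool) : Prop := out = in1_alt id start end_
instance (id : Int) (start : Int) (end_ : Int) (out : Bool) : Decidable (Spec_in1 id start end_ out) := by unfold Spec_in1; infer_instance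

-- ===== CLAIM (what is proved, stated in full; the proofs are below) =====
def Claim_equal_in1 : Prop := ∀ (id : Int) (start : Int) (end_ : Int), Dom_in1 id start end_ → Spec_in1 id start end_ (in1 id start end_)

-- ===== LEMMAS AND PROOFS =====

-- ===== VERDICT (by name: the statement is the Claim_ definition above) =====
theorem in1_spec : Claim_equal_in1 := by
  intro id start end_ _
  unfold Spec_in1
  by_cases h1 : id = start
  · simp [in1, in1_alt, h1]
  by_cases h2 : id = end_
  · simp [in1, in1_alt, h2]
  by_cases h3 : start = end_
  · simp [in1, in1_alt, h3]
  rcases lt_trichotomy start end_ with h | h | h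
  · rw [in1]
    simp only [in1_alt]
    simp [h1, h2, h3, h, not_lt.mpr (le_of_lt h)]
    rw [Bool.eq_iff_iff]
    simp
    omega
  · exact absurd h h3
  · rw [in1, in1]
    simp only [in1_alt]
    simp [h1, h2, h3, Ne.symm h3, h, not_lt.mpr (le_of_lt h)]
    rw [Bool.eq_iff_iff]
    simp
    omega
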